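-- pv_equiv track=rewrite | github.com/cazanbogdan2000/Convex-Polygons | myFunctions.py | canBePolygon
-- ===== SOURCE A (Python) =====
-- def addFreeVectors(vector1, vector2):
--     xProjection1 = vector1[0]
--     yProjection1 = vector1[1]
--     xProjection2 = vector2[0]
--     yProjection2 = vector2[1]
--     xProjectionResult = xProjection1 + xProjection2
--     yProjectionResult = yProjection1 + yProjection2
--     return (xProjectionResult, yProjectionResult)
--
-- def canBePolygon(freeVectors):
--     # we cannot have a polygon with less than 3 sides
--     if len(freeVectors) < 3:
--         return False
--     # compute the sum of the vectors
--     result = freeVectors[0]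
--     for vector in freeVectors[1:]:
--         result = addFreeVectors(vector, result)
--     # if the resulted vector is 0i + 0j, then we can create a polygon
--     if result == (0, 0):
--         return True
--     # otherwise, there does not exists such a polygon
--     else:
--         return False
-- ===== SOURCE B (Python) =====
-- def canBePolygon(freeVectors):
--     # Divide-and-conquer: the total of the vectors is computed by a balanced
--     # reduction tree (sum of left half + sum of right half) instead of A's
--     # linear left fold through the addFreeVectors helper.
--     def total(lo, hi):
--         if hi - lo == 0:
--             return (0, 0)
--         if hi - lo == 1:
--             return freeVectors[lo]
--         mid = (lo + hi) // 2
--         a = total(lo, mid)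
--         b = total(mid, hi)
--         return (a[0] + b[0], a[1] + b[1])
--     return len(freeVectors) >= 3 and total(0, len(freeVectors)) == (0, 0)
-- ===== Notes on version B (the rewrite author's own statement) =====
-- stated objective: alternative
-- what changed: Replaces A's linear left fold (seeded with the first vector and threaded through the addFreeVectors helper) by a divide-and-conquer balanced reduction tree that sums each half recursively and adds the two halves, combined with the length test by short-circuit and; correct because vector addition is associative.
import Mathlib
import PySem

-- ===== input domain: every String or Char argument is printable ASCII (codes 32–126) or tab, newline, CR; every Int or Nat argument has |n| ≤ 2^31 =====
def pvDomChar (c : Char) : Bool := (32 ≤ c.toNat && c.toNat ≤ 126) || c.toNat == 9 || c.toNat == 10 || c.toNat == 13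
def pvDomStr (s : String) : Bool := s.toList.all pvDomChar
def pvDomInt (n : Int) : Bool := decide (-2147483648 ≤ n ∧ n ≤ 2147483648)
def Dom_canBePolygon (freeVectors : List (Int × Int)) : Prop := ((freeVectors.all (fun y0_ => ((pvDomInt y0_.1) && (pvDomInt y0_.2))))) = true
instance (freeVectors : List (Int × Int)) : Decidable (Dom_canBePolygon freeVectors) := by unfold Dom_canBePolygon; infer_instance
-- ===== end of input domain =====

-- B replaces A's linear left fold (seeded with the first vector, threaded through the
-- addFreeVectors helper) by a divide-and-conquer balanced reduction tree (objective: alternative).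

-- ===== PORT A =====
def addFreeVectors (vector1 vector2 : Int × Int) : Int × Int :=
  let xProjection1 := vector1.1
  let yProjection1 := vector1.2
  let xProjection2 := vector2.1
  let yProjection2 := vector2.2
  let xProjectionResult := xProjection1 + xProjection2
  let yProjectionResult := yProjection1 + yProjection2
  (xProjectionResult, yProjectionResult)

def canBePolygon (freeVectors : List (Int × Int)) : Bool :=
  if freeVectors.length < 3 then false
  else
    match freeVectors with
    | [] => false  -- unreachable: length ≥ 3
    | first :: rest =>
      let result := rest.foldl (fun r v => addFreeVectors v r) first
      if result = ((0 : Int), (0 : Int)) then true else false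

-- ===== PORT B =====
def pvTotal : List (Int × Int) → Int × Int
  | [] => ((0 : Int), (0 : Int))
  | [v] => v
  | v1 :: v2 :: rest =>
    let vs := v1 :: v2 :: rest
    let m := vs.length / 2
    let a := pvTotal (vs.take m)
    let b := pvTotal (vs.drop m)
    (a.1 + b.1, a.2 + b.2)
termination_by vs => vs.length
decreasing_by
  all_goals simp [List.length_take, List.length_drop]; omega

def canBePolygon_alt (freeVectors : List (Int × Int)) : Bool :=
  decide (3 ≤ freeVectors.length) && decide (pvTotal freeVectors = ((0 : Int), (0 : Int)))

-- ===== PRECONDITION & SPEC =====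
def Spec_canBePolygon (freeVectors : List (Int × Int)) (out : Bool) : Prop := out = canBePolygon_alt freeVectors
instance (freeVectors : List (Int × Int)) (out : Bool) : Decidable (Spec_canBePolygon freeVectors out) := by unfold Spec_canBePolygon; infer_instance

-- ===== CLAIM (what is proved, stated in full; the proofs are below) =====
def Claim_equal_canBePolygon : Prop := ∀ (freeVectors : List (Int × Int)), Dom_canBePolygon freeVectors → Spec_canBePolygon freeVectors (canBePolygon freeVectors)

-- ===== LEMMAS AND PROOFS =====

theorem pvTotal_eq (vs : List (Int × Int)) :
    pvTotal vs = ((vs.map Prod.fst).sum, (vs.map Prod.snd).sum) := by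
  induction vs using pvTotal.induct with
  | case1 => simp [pvTotal]
  | case2 v => simp [pvTotal]
  | case3 =>
    rename_i v1 v2 rest vs m ih1 ih2
    rw [pvTotal]
    simp only at ih1 ih2 ⊢
    rw [ih1, ih2]
    have hsplit := List.take_append_drop ((v1 :: v2 :: rest).length / 2) (v1 :: v2 :: rest)
    conv_rhs => rw [← hsplit]
    simp
    simp [vs]

theorem foldl_add_eq_total (t : List (Int × Int)) : ∀ (h : Int × Int),
    t.foldl (fun r v => addFreeVectors v r) h
      = (h.1 + (t.map Prod.fst).sum, h.2 + (t.map Prod.snd).sum) := by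
  induction t with
  | nil => intro h; simp
  | cons v t ih =>
    intro h
    simp only [List.foldl_cons]
    rw [ih (addFreeVectors v h)]
    simp [addFreeVectors]
    constructor <;> omega

-- ===== VERDICT (by name: the statement is the Claim_ definition above) =====
theorem canBePolygon_spec : Claim_equal_canBePolygon := by
  intro fv _
  unfold Spec_canBePolygon canBePolygon canBePolygon_alt
  by_cases hlen : fv.length < 3
  · simp only [if_pos hlen]
    have : ¬ 3 ≤ fv.length := by omega
    simp [this]
  · match fv with
    | [] => simp at hlen
    | first :: rest =>
      simp only [if_neg hlen]
      rw [foldl_add_eq_total, pvTotal_eq]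
      simp only [List.length_cons, not_lt] at hlen
      simp [Prod.ext_iff]
      intro _ _
      omega
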